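-- pv_equiv track=rewrite | github.com/GabrielOWO799/personal-assistant | scripts/ai_toy_weekly_search_v2.py | filter_by_source
-- ===== SOURCE A (Python) =====
-- def filter_by_source(results):
--     """按来源优先级筛选"""
--     priority_sources = {
--         'high': ['kickstarter.com', 'indiegogo.com', 'techcrunch.com', 'theverge.com', 'toybook.com'],
--         'medium': ['36kr.com', 'itjuzi.com', 'iimedia.cn', 'sina.com.cn', 'qq.com', 'sohu.com'],
--         'low': ['zhihu.com', 'csdn.net', 'github.com']
--     }
--
--     filtered = {'high': [], 'medium': [], 'low': []}
--
--     for result in results: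
--         url = result.get('url', '')
--         for level, domains in priority_sources.items():
--             if any(domain in url for domain in domains):
--                 filtered[level].append(result)
--                 break
--         else:
--             filtered['low'].append(result)
--
--     return filtered['high'] + filtered['medium'] + filtered['low']
-- ===== SOURCE B (Python) =====
-- def filter_by_source(results):
--     """按来源优先级筛选 — re-implemented as one stable sort by a priority key."""
--     high = ['kickstarter.com', 'indiegogo.com', 'techcrunch.com', 'theverge.com', 'toybook.com']
--     medium = ['36kr.com', 'itjuzi.com', 'iimedia.cn', 'sina.com.cn', 'qq.com', 'sohu.com']
--
--     def priority(result):
--         url = result.get('url', '')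
--         if any(d in url for d in high):
--             return 0
--         if any(d in url for d in medium):
--             return 1
--         return 2
--
--     return sorted(results, key=priority)
-- ===== Notes on version B (the rewrite author's own statement) =====
-- stated objective: idiomatic
-- what changed: Replaced the three-accumulator dict with break/else bucket loop and concatenation by a single stable sort keyed on a priority(result) rank (0=high, 1=medium, 2=low/no match); stability reproduces A's within-bucket order exactly.
import Mathlib
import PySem

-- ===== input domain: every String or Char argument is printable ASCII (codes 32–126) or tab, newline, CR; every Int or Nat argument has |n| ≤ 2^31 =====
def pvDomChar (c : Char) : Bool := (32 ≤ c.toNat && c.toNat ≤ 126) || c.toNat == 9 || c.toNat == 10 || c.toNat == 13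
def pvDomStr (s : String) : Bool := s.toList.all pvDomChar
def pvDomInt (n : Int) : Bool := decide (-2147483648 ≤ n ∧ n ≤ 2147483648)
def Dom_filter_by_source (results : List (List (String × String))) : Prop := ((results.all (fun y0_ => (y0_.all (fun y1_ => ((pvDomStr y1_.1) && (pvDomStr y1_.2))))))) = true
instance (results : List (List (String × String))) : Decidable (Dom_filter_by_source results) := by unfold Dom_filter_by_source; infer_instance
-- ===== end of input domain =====

-- B replaces A's three-bucket dict loop (break/else) with one stable sort by a priority key; same values, idiomatic decomposition, no speed claim.

-- ===== PORT A =====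
-- A's priority_sources dict (literal domain lists, in insertion order)
def pvA_sources : List (String × List String) :=
  [("high", ["kickstarter.com", "indiegogo.com", "techcrunch.com", "theverge.com", "toybook.com"]),
   ("medium", ["36kr.com", "itjuzi.com", "iimedia.cn", "sina.com.cn", "qq.com", "sohu.com"]),
   ("low", ["zhihu.com", "csdn.net", "github.com"])]

-- the for/break/else over priority_sources.items(): first level whose domains match, if any
def pvA_step (f : PySem.Dict String (List (List (String × String)))) (result : List (String × String)) :
    PySem.Dict String (List (List (String × String))) :=
  let url := (PySem.Dict.mk result).getD "url" ""
  match pvA_sources.find? (fun ld => ld.2.any (fun dmn => PySem.Str.isIn dmn url)) with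
  | some ld => f.modify ld.1 [] (fun b => b ++ [result])
  | none => f.modify "low" [] (fun b => b ++ [result])

def filter_by_source (results : List (List (String × String))) : List (List (String × String)) :=
  let filtered := results.foldl pvA_step
    (PySem.Dict.mk [("high", []), ("medium", []), ("low", [])])
  filtered.getD "high" [] ++ filtered.getD "medium" [] ++ filtered.getD "low" []

-- ===== PORT B =====
def pvB_high : List String :=
  ["kickstarter.com", "indiegogo.com", "techcrunch.com", "theverge.com", "toybook.com"]
def pvB_medium : List String :=
  ["36kr.com", "itjuzi.com", "iimedia.cn", "sina.com.cn", "qq.com", "sohu.com"]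

def pvB_priority (result : List (String × String)) : Int :=
  let url := (PySem.Dict.mk result).getD "url" ""
  if pvB_high.any (fun d => PySem.Str.isIn d url) then 0
  else if pvB_medium.any (fun d => PySem.Str.isIn d url) then 1
  else 2

def filter_by_source_alt (results : List (List (String × String))) : List (List (String × String)) :=
  PySem.List.sorted results pvB_priority false

-- ===== PRECONDITION & SPEC =====
def Spec_filter_by_source (results : List (List (String × String))) (out : List (List (String × String))) : Prop := out = filter_by_source_alt results
instance (results : List (List (String × String))) (out : List (List (String × String))) : Decidable (Spec_filter_by_source results out) := by unfold Spec_filter_by_source; infer_instance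

-- ===== CLAIM (what is proved, stated in full; the proofs are below) =====
def Claim_equal_filter_by_source : Prop := ∀ (results : List (List (String × String))), Dom_filter_by_source results → Spec_filter_by_source results (filter_by_source results)


-- ===== LEMMAS AND PROOFS =====

theorem pvB_priority_cases (r : List (String × String)) :
    pvB_priority r = 0 ∨ pvB_priority r = 1 ∨ pvB_priority r = 2 := by
  unfold pvB_priority; dsimp only; split_ifs <;> simp

theorem insertBy_append_not {α : Type} (before : α → α → Bool) (x : α) (A R : List α)
    (hA : ∀ a ∈ A, before x a = false) :
    PySem.List.insertBy before x (A ++ R) = A ++ PySem.List.insertBy before x R := by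
  induction A with
  | nil => rfl
  | cons a A ih =>
    have := hA a (by simp)
    simp [PySem.List.insertBy, this]
    exact ih (fun a ha => hA a (by simp [ha]))

theorem insertBy_middle {α : Type} (before : α → α → Bool) (x : α) (A R : List α)
    (hA : ∀ a ∈ A, before x a = false) (hR : ∀ r ∈ R, before x r = true) :
    PySem.List.insertBy before x (A ++ R) = A ++ x :: R := by
  rw [insertBy_append_not before x A R hA]
  cases R with
  | nil => rfl
  | cons r R => simp [PySem.List.insertBy, hR r (by simp)]

-- B side: the stable insertion sort keeps the three priority buckets in input order
theorem sorted_buckets (results : List (List (String × String))) :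
    PySem.List.sorted results pvB_priority false =
      results.filter (fun r => pvB_priority r = 0) ++
      results.filter (fun r => pvB_priority r = 1) ++
      results.filter (fun r => pvB_priority r = 2) := by
  rw [PySem.List.sorted_eq_foldl_insertBy]
  suffices h : ∀ (xs : List (List (String × String))) (b0 b1 b2 : List (List (String × String))),
      (∀ a ∈ b0, pvB_priority a = 0) → (∀ a ∈ b1, pvB_priority a = 1) → (∀ a ∈ b2, pvB_priority a = 2) →
      xs.foldl (fun acc x => PySem.List.insertBy (fun a b => decide (pvB_priority a < pvB_priority b)) x acc) (b0 ++ b1 ++ b2) =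
        (b0 ++ xs.filter (fun r => pvB_priority r = 0)) ++
        (b1 ++ xs.filter (fun r => pvB_priority r = 1)) ++
        (b2 ++ xs.filter (fun r => pvB_priority r = 2)) by
    simpa using h results [] [] [] (by simp) (by simp) (by simp)
  intro xs
  induction xs with
  | nil => intro b0 b1 b2 _ _ _; simp
  | cons x xs ih =>
    intro b0 b1 b2 h0 h1 h2
    rcases pvB_priority_cases x with hx | hx | hx
    · have step : PySem.List.insertBy (fun a b => decide (pvB_priority a < pvB_priority b)) x (b0 ++ b1 ++ b2) = (b0 ++ [x]) ++ b1 ++ b2 := by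
        rw [List.append_assoc, insertBy_middle _ x b0 (b1 ++ b2)
          (fun a ha => by simp [h0 a ha, hx])
          (fun r hr => by
            rcases List.mem_append.mp hr with h | h
            · simp [h1 r h, hx]
            · simp [h2 r h, hx])]
        simp
      simp only [List.foldl_cons, step]
      rw [ih (b0 ++ [x]) b1 b2
        (fun a ha => by rcases List.mem_append.mp ha with h | h; exact h0 a h; simp at h; simp [h, hx]) h1 h2]
      simp [hx]
    · have step : PySem.List.insertBy (fun a b => decide (pvB_priority a < pvB_priority b)) x (b0 ++ b1 ++ b2) = b0 ++ (b1 ++ [x]) ++ b2 := by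
        rw [insertBy_middle _ x (b0 ++ b1) b2
          (fun a ha => by
            rcases List.mem_append.mp ha with h | h
            · simp [h0 a h, hx]
            · simp [h1 a h, hx])
          (fun r hr => by simp [h2 r hr, hx])]
        simp
      simp only [List.foldl_cons, step]
      rw [ih b0 (b1 ++ [x]) b2 h0
        (fun a ha => by rcases List.mem_append.mp ha with h | h; exact h1 a h; simp at h; simp [h, hx]) h2]
      simp [hx]
    · have step : PySem.List.insertBy (fun a b => decide (pvB_priority a < pvB_priority b)) x (b0 ++ b1 ++ b2) = b0 ++ b1 ++ (b2 ++ [x]) := by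
        have := insertBy_middle (fun a b => decide (pvB_priority a < pvB_priority b)) x (b0 ++ b1 ++ b2) []
          (fun a ha => by
            rcases List.mem_append.mp ha with h | h
            · rcases List.mem_append.mp h with h' | h'
              · simp [h0 a h', hx]
              · simp [h1 a h', hx]
            · simp [h2 a h, hx])
          (fun r hr => by simp at hr)
        simpa using this
      simp only [List.foldl_cons, step]
      rw [ih b0 b1 (b2 ++ [x]) h0 h1
        (fun a ha => by rcases List.mem_append.mp ha with h | h; exact h2 a h; simp at h; simp [h, hx])]
      simp [hx]

-- A side: the dict fold keeps exactly the same three buckets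
theorem pvA_step_eq (f : PySem.Dict String (List (List (String × String)))) (r : List (String × String))
    (h m l : List (List (String × String))) (hf : f = PySem.Dict.mk [("high", h), ("medium", m), ("low", l)]) :
    pvA_step f r =
      if pvB_priority r = 0 then PySem.Dict.mk [("high", h ++ [r]), ("medium", m), ("low", l)]
      else if pvB_priority r = 1 then PySem.Dict.mk [("high", h), ("medium", m ++ [r]), ("low", l)]
      else PySem.Dict.mk [("high", h), ("medium", m), ("low", l ++ [r])] := by
  subst hf
  unfold pvA_step pvA_sources pvB_priority pvB_high pvB_medium
  dsimp only
  rcases Bool.eq_false_or_eq_true (List.any ["kickstarter.com", "indiegogo.com", "techcrunch.com", "theverge.com", "toybook.com"]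
      (fun dmn => PySem.Str.isIn dmn ((PySem.Dict.mk r).getD "url" ""))) with h0 | h0 <;>
  rcases Bool.eq_false_or_eq_true (List.any ["36kr.com", "itjuzi.com", "iimedia.cn", "sina.com.cn", "qq.com", "sohu.com"]
      (fun dmn => PySem.Str.isIn dmn ((PySem.Dict.mk r).getD "url" ""))) with h1 | h1 <;>
  rcases Bool.eq_false_or_eq_true (List.any ["zhihu.com", "csdn.net", "github.com"]
      (fun dmn => PySem.Str.isIn dmn ((PySem.Dict.mk r).getD "url" ""))) with h2 | h2 <;>
  simp only [List.find?, h0, h1, h2] <;>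
  simp [PySem.Dict.modify, PySem.Dict.insert, PySem.Dict.getD, PySem.Dict.get?, PySem.Dict.contains]

theorem A_fold (xs : List (List (String × String))) (h m l : List (List (String × String))) :
    xs.foldl pvA_step (PySem.Dict.mk [("high", h), ("medium", m), ("low", l)]) =
      PySem.Dict.mk [("high", h ++ xs.filter (fun r => pvB_priority r = 0)),
                     ("medium", m ++ xs.filter (fun r => pvB_priority r = 1)),
                     ("low", l ++ xs.filter (fun r => pvB_priority r = 2))] := by
  induction xs generalizing h m l with
  | nil => simp
  | cons x xs ih =>
    simp only [List.foldl_cons, pvA_step_eq _ x h m l rfl]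
    rcases pvB_priority_cases x with hx | hx | hx <;>
      simp [hx, ih]

-- ===== VERDICT (by name: the statement is the Claim_ definition above) =====
theorem filter_by_source_spec : Claim_equal_filter_by_source := by
  intro results _
  unfold Spec_filter_by_source filter_by_source filter_by_source_alt
  rw [sorted_buckets, A_fold]
  rfl
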